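-- pv_equiv track=rewrite | github.com/devJS00/algorithm-study | greedy/boj/silver/20365. 블로그2/20365.py | solution
-- ===== SOURCE A (Python) =====
-- def solution(N, colors):
--     red_blocks = 0
--     blue_blocks = 0
--
--     if colors[0] == "R":
--         red_blocks += 1
--     else:
--         blue_blocks += 1
--
--     for i in range(1, N):
--         if colors[i] != colors[i - 1]:
--             if colors[i] == "R":
--                 red_blocks += 1
--             elif colors[i] == "B":
--                 blue_blocks += 1
--
--     return min(red_blocks, blue_blocks) + 1
-- ===== SOURCE B (Python) =====
-- def solution(N, colors):
--     transitions = 0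
--     for i in range(1, N):
--         if colors[i] != colors[i - 1]:
--             transitions += 1
--     return (transitions + 1) // 2 + 1
-- ===== Notes on version B (the rewrite author's own statement) =====
-- stated objective: simpler
-- what changed: B drops A's two per-color run counters entirely: it counts only color transitions in one pass and returns the closed form (transitions+1)//2+1 (R- and B-runs alternate, so the rarer color has exactly (transitions+1)//2 runs); Pre_ excludes the inputs where A raises IndexError (empty colors or N > len(colors)) and the malformed inputs that, with N >= 2, mix a non-'R'/'B' string with a different value among the first N entries, on which A's tally is accidental.
-- outside the precondition, e.g. on solution(2, ['R', 'X']): A returns 1, B returns 2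
import Mathlib
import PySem

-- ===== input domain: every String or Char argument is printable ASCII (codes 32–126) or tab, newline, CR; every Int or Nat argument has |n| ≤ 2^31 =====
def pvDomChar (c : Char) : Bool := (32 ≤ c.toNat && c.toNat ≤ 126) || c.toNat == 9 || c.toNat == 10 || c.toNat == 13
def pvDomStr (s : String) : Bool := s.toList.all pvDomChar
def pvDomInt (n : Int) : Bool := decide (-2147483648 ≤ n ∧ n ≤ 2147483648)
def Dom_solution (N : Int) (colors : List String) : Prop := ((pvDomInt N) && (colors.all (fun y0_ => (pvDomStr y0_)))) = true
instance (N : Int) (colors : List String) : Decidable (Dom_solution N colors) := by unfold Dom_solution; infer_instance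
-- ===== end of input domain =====

-- B keeps no per-color counters: it counts color transitions in one pass and returns
-- (transitions+1)//2 + 1, the closed form for the rarer color's run count (objective: simpler).

-- ===== PORT A =====
def solution (N : Int) (colors : List String) : Int :=
  let init : Int × Int := if PySem.List.pyGetD colors 0 "" = "R" then (1, 0) else (0, 1)
  let p := (PySem.List.pyRange 1 N 1).foldl (fun rb i =>
      if PySem.List.pyGetD colors i "" ≠ PySem.List.pyGetD colors (i - 1) "" then
        if PySem.List.pyGetD colors i "" = "R" then (rb.1 + 1, rb.2)
        else if PySem.List.pyGetD colors i "" = "B" then (rb.1, rb.2 + 1)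
        else rb
      else rb) init
  min p.1 p.2 + 1

-- ===== PORT B =====
def solution_alt (N : Int) (colors : List String) : Int :=
  let t := (PySem.List.pyRange 1 N 1).foldl (fun t i =>
      if PySem.List.pyGetD colors i "" ≠ PySem.List.pyGetD colors (i - 1) "" then t + 1 else t)
      (0 : Int)
  PySem.Int.floordiv (t + 1) 2 + 1

-- ===== PRECONDITION & SPEC =====
-- Pre_ excludes the inputs where A raises IndexError (empty colors, or N > len(colors)) and the
-- malformed inputs that, with N ≥ 2, mix a string other than "R"/"B" with a different value among
-- the first N entries: those are outside this two-color task's natural domain, and A's tally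
-- there is an accident of its branch structure.
def Pre_solution (N : Int) (colors : List String) : Prop :=
  colors ≠ [] ∧ N ≤ (colors.length : Int) ∧
    (N ≤ 1 ∨ (∀ s ∈ colors.take N.toNat, s = "R" ∨ s = "B") ∨
      (∀ s ∈ colors.take N.toNat, s = colors.getD 0 ""))
instance (N : Int) (colors : List String) : Decidable (Pre_solution N colors) := by
  unfold Pre_solution; infer_instance

def pvWitness_solution : Int × List String := (3, ["R", "B", "B"])

def Spec_solution (N : Int) (colors : List String) (out : Int) : Prop := out = solution_alt N colors
instance (N : Int) (colors : List String) (out : Int) : Decidable (Spec_solution N colors out) := by unfold Spec_solution; infer_instance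

-- ===== CLAIM (what is proved, stated in full; the proofs are below) =====
def Claim_equal_solution : Prop := ∀ (N : Int) (colors : List String), Dom_solution N colors → Pre_solution N colors → Spec_solution N colors (solution N colors)

-- ===== LEMMAS AND PROOFS =====

-- A fold whose step fixes every element of the list is the identity.
lemma foldl_id {α β : Type} (l : List β) (f : α → β → α) (init : α)
    (h : ∀ a, ∀ i ∈ l, f a i = a) : l.foldl f init = init := by
  induction l generalizing init with
  | nil => rfl
  | cons x xs ih =>
      rw [List.foldl_cons, h init x (List.mem_cons_self), ih]
      exact fun a i hi => h a i (List.mem_cons_of_mem _ hi)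

-- One transition step of both folds preserves the invariant.
lemma step_inv (gm gm1 : String) (P : Int × Int) (t : Int)
    (h1 : P.1 + P.2 = t + 1) (h2 : -1 ≤ P.1 - P.2) (h3 : P.1 - P.2 ≤ 1)
    (h4 : gm = "R" → P.2 ≤ P.1) (h5 : gm ≠ "R" → P.1 ≤ P.2)
    (hfst : gm = "R" ∨ gm = "B") (hcur : gm1 = "R" ∨ gm1 = "B") :
    ((if gm1 ≠ gm then
        if gm1 = "R" then (P.1 + 1, P.2) else if gm1 = "B" then (P.1, P.2 + 1) else P
      else P).1 +
     (if gm1 ≠ gm then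
        if gm1 = "R" then (P.1 + 1, P.2) else if gm1 = "B" then (P.1, P.2 + 1) else P
      else P).2 = (if gm1 ≠ gm then t + 1 else t) + 1) ∧
    (-1 ≤ (if gm1 ≠ gm then
        if gm1 = "R" then (P.1 + 1, P.2) else if gm1 = "B" then (P.1, P.2 + 1) else P
      else P).1 -
     (if gm1 ≠ gm then
        if gm1 = "R" then (P.1 + 1, P.2) else if gm1 = "B" then (P.1, P.2 + 1) else P
      else P).2) ∧
    ((if gm1 ≠ gm then
        if gm1 = "R" then (P.1 + 1, P.2) else if gm1 = "B" then (P.1, P.2 + 1) else P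
      else P).1 -
     (if gm1 ≠ gm then
        if gm1 = "R" then (P.1 + 1, P.2) else if gm1 = "B" then (P.1, P.2 + 1) else P
      else P).2 ≤ 1) ∧
    (gm1 = "R" →
      (if gm1 ≠ gm then
        if gm1 = "R" then (P.1 + 1, P.2) else if gm1 = "B" then (P.1, P.2 + 1) else P
      else P).2 ≤
      (if gm1 ≠ gm then
        if gm1 = "R" then (P.1 + 1, P.2) else if gm1 = "B" then (P.1, P.2 + 1) else P
      else P).1) ∧
    (gm1 ≠ "R" →
      (if gm1 ≠ gm then
        if gm1 = "R" then (P.1 + 1, P.2) else if gm1 = "B" then (P.1, P.2 + 1) else P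
      else P).1 ≤
      (if gm1 ≠ gm then
        if gm1 = "R" then (P.1 + 1, P.2) else if gm1 = "B" then (P.1, P.2 + 1) else P
      else P).2) := by
  split_ifs with hc hr hb
  · -- transition, new color "R": the previous color is not "R"
    have hprev : gm ≠ "R" := fun h => hc (hr.trans h.symm)
    have := h5 hprev
    exact ⟨by omega, by omega, by omega, fun _ => by omega, fun hn => absurd hr hn⟩
  · -- transition, new color "B": the previous color must be "R"
    have hprev : gm = "R" := by
      rcases hfst with h | h
      · exact h
      · exact absurd (hb.trans h.symm) hc
    have := h4 hprev
    exact ⟨by omega, by omega, by omega, fun h => absurd h hr, fun _ => by omega⟩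
  · -- impossible: the new color is "R" or "B"
    rcases hcur with h | h
    · exact absurd h hr
    · exact absurd h hb
  · -- no transition: everything is unchanged
    have he : gm1 = gm := not_not.mp hc
    exact ⟨h1, h2, h3, fun h => h4 (he.symm.trans h), fun h => h5 fun hm => h (he.trans hm)⟩

-- Invariant over the first m transition steps: A's two counters sum to B's transition count + 1,
-- they differ by at most one, and the counter of the color at position m is the larger one.
lemma inv_lemma (cs : List String) (m : Nat) (hm : m < cs.length)
    (hall : ∀ j : Nat, j ≤ m →
      PySem.List.pyGetD cs (j : Int) "" = "R" ∨ PySem.List.pyGetD cs (j : Int) "" = "B") :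
    (let p := (PySem.List.pyRange 1 ((m : Int) + 1) 1).foldl (fun rb i =>
        if PySem.List.pyGetD cs i "" ≠ PySem.List.pyGetD cs (i - 1) "" then
          if PySem.List.pyGetD cs i "" = "R" then (rb.1 + 1, rb.2)
          else if PySem.List.pyGetD cs i "" = "B" then (rb.1, rb.2 + 1)
          else rb
        else rb) (if PySem.List.pyGetD cs 0 "" = "R" then ((1 : Int), (0 : Int)) else (0, 1));
     let t := (PySem.List.pyRange 1 ((m : Int) + 1) 1).foldl (fun t i =>
        if PySem.List.pyGetD cs i "" ≠ PySem.List.pyGetD cs (i - 1) "" then t + 1 else t) (0 : Int);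
     p.1 + p.2 = t + 1 ∧ -1 ≤ p.1 - p.2 ∧ p.1 - p.2 ≤ 1 ∧
       (PySem.List.pyGetD cs (m : Int) "" = "R" → p.2 ≤ p.1) ∧
       (PySem.List.pyGetD cs (m : Int) "" ≠ "R" → p.1 ≤ p.2)) := by
  induction m with
  | zero =>
      simp only [Nat.cast_zero, zero_add, PySem.List.pyRange_one_eq_nil (by omega : (1:Int) ≤ 1),
        List.foldl_nil]
      by_cases h0 : PySem.List.pyGetD cs 0 "" = "R" <;> simp [h0]
  | succ m ih =>
      have hm' : m < cs.length := by omega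
      have hall' : ∀ j : Nat, j ≤ m →
          PySem.List.pyGetD cs (j : Int) "" = "R" ∨ PySem.List.pyGetD cs (j : Int) "" = "B" :=
        fun j hj => hall j (by omega)
      obtain ⟨h1, h2, h3, h4, h5⟩ := ih hm' hall'
      have hsplit : PySem.List.pyRange 1 (((m + 1 : Nat) : Int) + 1) 1
          = PySem.List.pyRange 1 ((m : Int) + 1) 1 ++ [(m : Int) + 1] := by
        have := PySem.List.pyRange_one_succ_right (a := 1) (b := (m : Int) + 1) (by omega)
        push_cast
        convert this using 2
      have hcur := hall (m + 1) (le_refl _)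
      push_cast at hcur
      simp only [hsplit, List.foldl_append, List.foldl_cons, List.foldl_nil]
      have hsub : ((m : Int) + 1) - 1 = (m : Int) := by ring
      rw [hsub]
      push_cast
      exact step_inv _ _ _ _ h1 h2 h3 h4 h5 (hall' m (le_refl _)) hcur

theorem solution_spec : Claim_equal_solution := by
  intro N colors hD hP
  obtain ⟨hne, hlen, hcase⟩ := hP
  simp only [Spec_solution, solution, solution_alt]
  by_cases hN : N ≤ 1
  · rw [PySem.List.pyRange_one_eq_nil hN]
    simp only [List.foldl_nil]
    have h12 : PySem.Int.floordiv (0 + 1) 2 = 0 := by decide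
    rw [h12]
    by_cases hR : PySem.List.pyGetD colors 0 "" = "R" <;> simp [hR]
  · rcases hcase with hN1 | hRB | hconst
    · omega
    · -- all of the first N colors are "R"/"B": use the alternating-runs invariant
      set m : Nat := N.toNat - 1 with hm_def
      have hNm : N = ((m : Int) + 1) := by omega
      have hmlt : m < colors.length := by omega
      have hall : ∀ j : Nat, j ≤ m →
          PySem.List.pyGetD colors (j : Int) "" = "R" ∨
          PySem.List.pyGetD colors (j : Int) "" = "B" := by
        intro j hj
        have hjlt : j < colors.length := by omega
        have hjN : j < N.toNat := by omega
        have hget : PySem.List.pyGetD colors (j : Int) "" = colors[j] := by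
          rw [PySem.List.pyGetD_eq_getElem colors "" (by omega) (by omega)]
          simp
        rw [hget]
        have hmem : colors[j] ∈ colors.take N.toNat := by
          have : (colors.take N.toNat)[j]'(by simp; omega) = colors[j] := List.getElem_take
          exact this ▸ List.getElem_mem _
        exact hRB _ hmem
      have := inv_lemma colors m hmlt hall
      rw [hNm]
      simp only at this
      obtain ⟨h1, h2, h3, _, _⟩ := this
      set p := (PySem.List.pyRange 1 ((m : Int) + 1) 1).foldl (fun rb i =>
          if PySem.List.pyGetD colors i "" ≠ PySem.List.pyGetD colors (i - 1) "" then
            if PySem.List.pyGetD colors i "" = "R" then (rb.1 + 1, rb.2)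
            else if PySem.List.pyGetD colors i "" = "B" then (rb.1, rb.2 + 1)
            else rb
          else rb) (if PySem.List.pyGetD colors 0 "" = "R" then ((1 : Int), (0 : Int)) else (0, 1))
      set t := (PySem.List.pyRange 1 ((m : Int) + 1) 1).foldl (fun t i =>
          if PySem.List.pyGetD colors i "" ≠ PySem.List.pyGetD colors (i - 1) "" then t + 1 else t)
          (0 : Int)
      have hfd : PySem.Int.floordiv (t + 1) 2 = (t + 1) / 2 :=
        PySem.Int.floordiv_eq_ediv_of_pos (by omega)
      rw [hfd]
      rcases le_total p.1 p.2 with h | h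
      · rw [min_eq_left h]; omega
      · rw [min_eq_right h]; omega
    · -- the first N colors are all the same string: no transitions, both folds collapse
      have hsame : ∀ i : Int, i ∈ PySem.List.pyRange 1 N 1 →
          PySem.List.pyGetD colors i "" = PySem.List.pyGetD colors (i - 1) "" := by
        intro i hi
        rw [PySem.List.mem_pyRange_one] at hi
        have hval : ∀ j : Int, 0 ≤ j → j < N → PySem.List.pyGetD colors j "" = colors.getD 0 "" := by
          intro j hj0 hjN
          have hjlt : j.toNat < colors.length := by omega
          rw [PySem.List.pyGetD_eq_getElem colors "" (by omega) (by omega)]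
          have hmem : colors[j.toNat] ∈ colors.take N.toNat := by
            have : (colors.take N.toNat)[j.toNat]'(by simp; omega) = colors[j.toNat] :=
              List.getElem_take
            exact this ▸ List.getElem_mem _
          exact hconst _ hmem
        rw [hval i (by omega) (by omega), hval (i - 1) (by omega) (by omega)]
      have hA : ∀ (rb : Int × Int), ∀ i ∈ PySem.List.pyRange 1 N 1,
          (if PySem.List.pyGetD colors i "" ≠ PySem.List.pyGetD colors (i - 1) "" then
            if PySem.List.pyGetD colors i "" = "R" then (rb.1 + 1, rb.2)
            else if PySem.List.pyGetD colors i "" = "B" then (rb.1, rb.2 + 1)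
            else rb
          else rb) = rb := by
        intro rb i hi
        rw [if_neg (not_not.mpr (hsame i hi))]
      have hB : ∀ (t : Int), ∀ i ∈ PySem.List.pyRange 1 N 1,
          (if PySem.List.pyGetD colors i "" ≠ PySem.List.pyGetD colors (i - 1) "" then t + 1
            else t) = t := by
        intro t i hi
        rw [if_neg (not_not.mpr (hsame i hi))]
      rw [foldl_id _ _ _ hA, foldl_id _ _ _ hB]
      have h12 : PySem.Int.floordiv (0 + 1) 2 = 0 := by decide
      rw [h12]
      by_cases hR : PySem.List.pyGetD colors 0 "" = "R" <;> simp [hR]
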